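-- pv_equiv track=rewrite | github.com/SestrenExsis/CodeKatas | adventofcode/AdventOfCode2022.py | get_elves
-- ===== SOURCE A (Python) =====
-- from typing import Dict, List, Set, Tuple
--
-- def get_elves(raw_input_lines: List[str]):
--     elves = [[]]
--     for raw_input_line in raw_input_lines:
--         if len(raw_input_line) < 1:
--             elves.append([])
--         else:
--             elves[-1].append(int(raw_input_line))
--     result = elves
--     return result
-- ===== SOURCE B (Python) =====
-- from typing import Dict, List, Set, Tuple
--
-- def get_elves(raw_input_lines: List[str]):
--     seps = (
--         [-1]
--         + [i for i, line in enumerate(raw_input_lines) if len(line) < 1]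
--         + [len(raw_input_lines)]
--     )
--     result = [
--         [int(line) for line in raw_input_lines[a + 1:b]]
--         for a, b in zip(seps, seps[1:])
--     ]
--     return result
-- ===== Notes on version B (the rewrite author's own statement) =====
-- stated objective: alternative
-- what changed: B replaces A's running accumulator that appends each int to the last group by computing the blank-line separator positions (-1, blank indices, len) up front and slicing the input between consecutive separators, with no mutable last-group bookkeeping.
import Mathlib
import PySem

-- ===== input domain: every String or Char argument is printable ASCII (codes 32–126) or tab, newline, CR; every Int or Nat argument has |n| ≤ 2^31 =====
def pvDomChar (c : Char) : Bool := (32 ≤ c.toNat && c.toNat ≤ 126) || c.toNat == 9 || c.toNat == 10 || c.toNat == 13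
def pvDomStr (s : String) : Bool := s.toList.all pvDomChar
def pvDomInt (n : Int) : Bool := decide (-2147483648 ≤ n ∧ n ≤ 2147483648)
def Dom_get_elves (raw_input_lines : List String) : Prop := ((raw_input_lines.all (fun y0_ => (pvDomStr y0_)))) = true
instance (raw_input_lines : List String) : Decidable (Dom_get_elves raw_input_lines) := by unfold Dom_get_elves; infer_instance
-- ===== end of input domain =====

-- B replaces A's running-accumulator loop (append to the last group) by a separator-index
-- computation and slicing between consecutive separators (objective: alternative decomposition).

-- int(line); total form under Pre_get_elves, which guarantees ofStr? succeeds on non-blank lines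
def pvInt (s : String) : Int := (PySem.Int.ofStr? s).getD 0

-- ===== PORT A =====
def get_elves (raw_input_lines : List String) : List (List Int) :=
  let elves : List (List Int) :=
    raw_input_lines.foldl
      (fun elves raw_input_line =>
        if PySem.Str.len raw_input_line < 1 then
          elves ++ [[]]
        else
          elves.dropLast ++ [PySem.List.pyGetD elves (-1) [] ++ [pvInt raw_input_line]])
      [[]]
  elves

-- ===== PORT B =====
def get_elves_alt (raw_input_lines : List String) : List (List Int) :=
  let seps : List Int :=
    -1 ::
      ((((PySem.List.enumerate raw_input_lines 0).filter
          (fun p => PySem.Str.len p.2 < 1)).map (fun p => p.1))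
        ++ [PySem.List.len raw_input_lines])
  (seps.zip seps.tail).map (fun ab =>
    (PySem.List.slice raw_input_lines (some (ab.1 + 1)) (some ab.2)).map pvInt)

-- ===== PRECONDITION & SPEC =====
-- Pre_ excludes exactly the inputs where a non-blank line is not a valid int() literal,
-- on which Python's A raises ValueError.
def Pre_get_elves (raw_input_lines : List String) : Prop :=
  ∀ s ∈ raw_input_lines, ¬ PySem.Str.len s < 1 → (PySem.Int.ofStr? s).isSome
instance (raw_input_lines : List String) : Decidable (Pre_get_elves raw_input_lines) := by
  unfold Pre_get_elves; infer_instance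
def pvWitness_get_elves : List String := ["12", "-3", "", "4"]

def Spec_get_elves (raw_input_lines : List String) (out : List (List Int)) : Prop := out = get_elves_alt raw_input_lines
instance (raw_input_lines : List String) (out : List (List Int)) : Decidable (Spec_get_elves raw_input_lines out) := by unfold Spec_get_elves; infer_instance

-- ===== CLAIM (what is proved, stated in full; the proofs are below) =====
def Claim_equal_get_elves : Prop := ∀ (raw_input_lines : List String), Dom_get_elves raw_input_lines → Pre_get_elves raw_input_lines → Spec_get_elves raw_input_lines (get_elves raw_input_lines)

-- ===== LEMMAS AND PROOFS =====

-- Python's truth test 'len(line) < 1' holds exactly on the empty string.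
theorem pvBlank_iff (l : String) : PySem.Str.len l < 1 ↔ l = "" := by
  constructor
  · intro h
    by_contra hne
    have h2 : l.toList ≠ [] := fun hn => hne (String.toList_inj.mp (by simp [hn]))
    have h3 : 0 < l.toList.length := List.length_pos_of_ne_nil h2
    have h4 : ¬ PySem.Str.len l < 1 := by simp [PySem.Str.len_eq]; omega
    exact h4 h
  · rintro rfl; decide

-- Common recursive specification: groups of parsed ints split at blank lines.
def pvS : List String → List (List Int)
  | [] => [[]]
  | l :: ls =>
    if PySem.Str.len l < 1 then [] :: pvS ls
    else (pvInt l :: (pvS ls).headD []) :: (pvS ls).tail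

theorem pvS_ne_nil (ls : List String) : pvS ls ≠ [] := by
  cases ls with
  | nil => simp [pvS]
  | cons l ls => simp only [pvS]; split <;> simp

theorem pvS_shape (ls : List String) : (pvS ls).headD [] :: (pvS ls).tail = pvS ls := by
  cases h : pvS ls with
  | nil => exact absurd h (pvS_ne_nil ls)
  | cons a t => simp

theorem pvS_blank (l : String) (ls : List String) (hb : l = "") :
    pvS (l :: ls) = [] :: pvS ls := by
  simp [pvS, hb]

theorem pvS_nonblank (l : String) (ls : List String) (hb : ¬ l = "") :
    pvS (l :: ls) = (pvInt l :: (pvS ls).headD []) :: (pvS ls).tail := by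
  simp [pvS, hb]

-- ----- A equals pvS -----
theorem foldA_eq (ls : List String) :
    ∀ (es : List (List Int)) (g : List Int),
      ls.foldl
        (fun elves raw_input_line =>
          if PySem.Str.len raw_input_line < 1 then elves ++ [[]]
          else elves.dropLast ++ [PySem.List.pyGetD elves (-1) [] ++ [pvInt raw_input_line]])
        (es ++ [g])
      = es ++ (g ++ (pvS ls).headD []) :: (pvS ls).tail := by
  induction ls with
  | nil => intro es g; simp [pvS]
  | cons l ls ih =>
    intro es g
    rw [List.foldl_cons]
    by_cases hb : l = ""
    · have hc : PySem.Str.len l < 1 := (pvBlank_iff l).mpr hb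
      rw [if_pos hc, ih (es ++ [g]) [], pvS_blank l ls hb]
      simp only [List.headD_cons, List.tail_cons, List.append_nil, List.append_assoc,
        List.cons_append, List.nil_append]
      rw [pvS_shape]
    · have hc : ¬ PySem.Str.len l < 1 := fun h => hb ((pvBlank_iff l).mp h)
      rw [if_neg hc, List.dropLast_concat, PySem.List.pyGetD_neg_one_append_singleton,
        ih es (g ++ [pvInt l]), pvS_nonblank l ls hb]
      simp

theorem A_eq_pvS (lines : List String) : get_elves lines = pvS lines := by
  have h := foldA_eq lines [] []
  simp only [List.nil_append] at h
  rw [pvS_shape] at h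
  exact h

-- ----- B equals pvS -----

-- blank-line indices, as natural numbers
def pvBlanks : List String → List Nat
  | [] => []
  | l :: ls =>
    (if PySem.Str.len l < 1 then [0] else []) ++ (pvBlanks ls).map (· + 1)

theorem pvBlanks_blank (l : String) (ls : List String) (hb : l = "") :
    pvBlanks (l :: ls) = 0 :: (pvBlanks ls).map (· + 1) := by
  simp [pvBlanks, hb]

theorem pvBlanks_nonblank (l : String) (ls : List String) (hb : ¬ l = "") :
    pvBlanks (l :: ls) = (pvBlanks ls).map (· + 1) := by
  simp [pvBlanks, hb]

theorem enum_filter_eq (lines : List String) :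
    ∀ s : Int,
      (((PySem.List.enumerate lines s).filter (fun p => PySem.Str.len p.2 < 1)).map
        (fun p => p.1))
      = (pvBlanks lines).map (fun n : Nat => (n : Int) + s) := by
  induction lines with
  | nil => intro s; simp [PySem.List.enumerate_nil, pvBlanks]
  | cons l ls ih =>
    intro s
    rw [PySem.List.enumerate_cons]
    by_cases hb : l = ""
    · rw [pvBlanks_blank l ls hb]
      have hc : PySem.Str.len l < 1 := (pvBlank_iff l).mpr hb
      simp only [List.filter_cons, hc, decide_true, if_true, List.map_cons, List.map_map]
      rw [ih (s + 1)]
      congr 1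
      · simp
      · apply List.map_congr_left
        intro n _
        simp only [Function.comp_apply]
        push_cast
        ring
    · rw [pvBlanks_nonblank l ls hb]
      have hc : ¬ PySem.Str.len l < 1 := fun h => hb ((pvBlank_iff l).mp h)
      simp only [List.filter_cons, hc, decide_false, Bool.false_eq_true, if_false, List.map_map]
      rw [ih (s + 1)]
      apply List.map_congr_left
      intro n _
      simp only [Function.comp_apply]
      push_cast
      ring

-- groups as Nat-index drop/take between consecutive separators
def pvGroups (lines : List String) : Nat → List Nat → List (List Int)
  | _, [] => []
  | a, b :: rest => ((lines.drop a).take (b - a)).map pvInt :: pvGroups lines (b + 1) rest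

theorem zip_slice_eq (lines : List String) (bs : List Nat) :
    ∀ s : Nat,
      (((((s : Int) - 1) :: bs.map (Nat.cast : Nat → Int)).zip
          (bs.map (Nat.cast : Nat → Int))).map
        (fun ab => (PySem.List.slice lines (some (ab.1 + 1)) (some ab.2)).map pvInt))
      = pvGroups lines s bs := by
  induction bs with
  | nil => intro s; simp [pvGroups]
  | cons b rest ih =>
    intro s
    simp only [List.map_cons, List.zip_cons_cons, List.map_cons]
    rw [show ((s : Int) - 1) + 1 = (s : Int) by ring]
    rw [PySem.List.slice_natCast]
    simp only [pvGroups]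
    congr 1
    rw [show ((b : Nat) : Int) = (((b + 1 : Nat) : Int)) - 1 by push_cast; ring]
    exact ih (b + 1)

theorem pvGroups_shift (l : String) (ls : List String) (bs : List Nat) :
    ∀ s : Nat,
      pvGroups (l :: ls) (s + 1) (bs.map (· + 1)) = pvGroups ls s bs := by
  induction bs with
  | nil => intro s; simp [pvGroups]
  | cons b rest ih =>
    intro s
    simp only [List.map_cons, pvGroups, List.drop_succ_cons]
    rw [Nat.add_sub_add_right]
    congr 1
    exact ih (b + 1)

theorem groups_eq_pvS (lines : List String) :
    pvGroups lines 0 (pvBlanks lines ++ [lines.length]) = pvS lines := by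
  induction lines with
  | nil => simp [pvBlanks, pvGroups, pvS]
  | cons l ls ih =>
    by_cases hb : l = ""
    · rw [pvBlanks_blank l ls hb]
      simp only [List.length_cons, List.cons_append, pvGroups, Nat.sub_zero,
        List.take_zero, List.map_nil]
      rw [show (pvBlanks ls).map (· + 1) ++ [ls.length + 1]
            = (pvBlanks ls ++ [ls.length]).map (· + 1) by simp]
      rw [show (0 + 1 : Nat) = 0 + 1 from rfl, pvGroups_shift l ls _ 0, ih]
      rw [pvS_blank l ls hb]
    · have hbe : pvBlanks (l :: ls) = (pvBlanks ls).map (· + 1) := by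
        simp [pvBlanks, hb]
      rw [hbe, pvS_nonblank l ls hb]
      cases hbl : pvBlanks ls with
      | nil =>
        have hS : pvS ls = [ls.map pvInt] := by
          rw [← ih, hbl]
          simp [pvGroups]
        simp only [List.map_nil, List.nil_append, List.length_cons, pvGroups]
        simp [hS, List.take_of_length_le (le_refl ls.length)]
      | cons b rest =>
        have hS : pvS ls = ((ls.drop 0).take (b - 0)).map pvInt
            :: pvGroups ls (b + 1) (rest ++ [ls.length]) := by
          rw [← ih, hbl]
          simp [pvGroups]
        simp only [List.map_cons, List.cons_append, List.length_cons, pvGroups]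
        rw [show (rest.map (· + 1)) ++ [ls.length + 1]
              = (rest ++ [ls.length]).map (· + 1) by simp]
        rw [pvGroups_shift l ls _ (b + 1)]
        simp only [hS]
        simp [List.take_succ_cons]

theorem B_eq_pvS (lines : List String) : get_elves_alt lines = pvS lines := by
  unfold get_elves_alt
  simp only [PySem.List.len_eq, List.tail_cons]
  rw [enum_filter_eq lines 0]
  rw [show (pvBlanks lines).map (fun n : Nat => (n : Int) + 0)
        = (pvBlanks lines).map (Nat.cast : Nat → Int) by simp]
  rw [show ((pvBlanks lines).map (Nat.cast : Nat → Int) ++ [(lines.length : Int)])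
        = ((pvBlanks lines ++ [lines.length]).map (Nat.cast : Nat → Int)) by simp]
  rw [show (-1 : Int) = ((0 : Nat) : Int) - 1 by norm_num]
  rw [zip_slice_eq lines (pvBlanks lines ++ [lines.length]) 0]
  exact groups_eq_pvS lines

-- ===== VERDICT (by name: the statement is the Claim_ definition above) =====
theorem get_elves_spec : Claim_equal_get_elves := by
  intro lines _ _
  unfold Spec_get_elves
  rw [A_eq_pvS, B_eq_pvS]
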